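-- pv_equiv track=rewrite | github.com/GaboRamalho/data_engineer | problem_9.py | verificar_prescricao
-- ===== SOURCE A (Python) =====
-- def verificar_prescricao(prescricao, estoque):
--     # Criar dicionários para contar a frequência de cada medicamento na prescrição e no estoque
--     prescricao_freq = {}
--     estoque_freq = {}
--
--     # Contar a frequência de cada medicamento na prescrição
--     for medicamento in prescricao:
--         prescricao_freq[medicamento] = prescricao_freq.get(medicamento, 0) + 1
--
--     # Contar a frequência de cada medicamento no estoque
--     for medicamento in estoque:
--         estoque_freq[medicamento] = estoque_freq.get(medicamento, 0) + 1
--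
--     # Verificar se todos os medicamentos prescritos estão no estoque e se há quantidade suficiente
--     for medicamento, dose_prescrita in prescricao_freq.items():
--         if medicamento not in estoque_freq or estoque_freq[medicamento] < dose_prescrita:
--             return False
--
--     return True
-- ===== SOURCE B (Python) =====
-- def verificar_prescricao(prescricao, estoque):
--     # Remaining-demand map: count needs, then consume stock in one pass; met iff nothing remains.
--     need = {}
--     for medicamento in prescricao:
--         need[medicamento] = need.get(medicamento, 0) + 1
--     for item in estoque:
--         if item in need:
--             if need[item] == 1:
--                 del need[item]
--             else:
--                 need[item] -= 1
--     return not need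
-- ===== Notes on version B (the rewrite author's own statement) =====
-- stated objective: alternative
-- what changed: B keeps only a shrinking remaining-demand dict and consumes stock in a single pass (decrement-and-delete, finish with 'not need') instead of building a full stock frequency table and comparing the two tables afterwards.
import Mathlib
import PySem

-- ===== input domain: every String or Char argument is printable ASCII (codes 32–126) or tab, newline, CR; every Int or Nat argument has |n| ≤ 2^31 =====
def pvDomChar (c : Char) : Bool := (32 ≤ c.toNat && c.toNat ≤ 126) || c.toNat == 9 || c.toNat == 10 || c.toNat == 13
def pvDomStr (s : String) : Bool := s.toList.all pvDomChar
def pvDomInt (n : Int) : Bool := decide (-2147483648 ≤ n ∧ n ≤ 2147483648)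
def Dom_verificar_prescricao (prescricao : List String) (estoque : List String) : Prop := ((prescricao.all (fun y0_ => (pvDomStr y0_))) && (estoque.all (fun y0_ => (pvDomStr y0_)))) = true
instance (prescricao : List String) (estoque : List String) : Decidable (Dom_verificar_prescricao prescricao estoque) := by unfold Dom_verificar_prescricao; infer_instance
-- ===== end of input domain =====

-- B replaces A's two frequency tables + comparison pass by a single shrinking remaining-demand
-- dict consumed in one pass over the stock ('alternative' decomposition; same asymptotic cost).

-- ===== PORT A =====
-- A's final loop over prescricao_freq.items with early 'return False'
def aCheck (estoqueFreq : PySem.Dict String Int) : List (String × Int) → Bool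
  | [] => true
  | (medicamento, dose) :: rest =>
    if !(estoqueFreq.contains medicamento) || estoqueFreq.getD medicamento 0 < dose then false
    else aCheck estoqueFreq rest

def verificar_prescricao (prescricao : List String) (estoque : List String) : Bool :=
  let prescricaoFreq :=
    prescricao.foldl (fun d m => d.insert m (d.getD m 0 + 1)) PySem.Dict.empty
  let estoqueFreq :=
    estoque.foldl (fun d m => d.insert m (d.getD m 0 + 1)) PySem.Dict.empty
  aCheck estoqueFreq prescricaoFreq.items

-- ===== PORT B =====
-- body of B's stock loop: consume one stock item from the remaining-demand dict
def bStep (need : PySem.Dict String Int) (item : String) : PySem.Dict String Int :=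
  if need.contains item then
    if need.getD item 0 == 1 then need.erase item
    else need.insert item (need.getD item 0 - 1)
  else need

def verificar_prescricao_alt (prescricao : List String) (estoque : List String) : Bool :=
  let need :=
    prescricao.foldl (fun d m => d.insert m (d.getD m 0 + 1)) PySem.Dict.empty
  let need := estoque.foldl bStep need
  need.size == 0

-- ===== PRECONDITION & SPEC =====
def Spec_verificar_prescricao (prescricao : List String) (estoque : List String) (out : Bool) : Prop := out = verificar_prescricao_alt prescricao estoque
instance (prescricao : List String) (estoque : List String) (out : Bool) : Decidable (Spec_verificar_prescricao prescricao estoque out) := by unfold Spec_verificar_prescricao; infer_instance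

-- ===== CLAIM (what is proved, stated in full; the proofs are below) =====
def Claim_equal_verificar_prescricao : Prop := ∀ (prescricao : List String) (estoque : List String), Dom_verificar_prescricao prescricao estoque → Spec_verificar_prescricao prescricao estoque (verificar_prescricao prescricao estoque)

-- ===== LEMMAS AND PROOFS =====

-- erase has no library lemma: lookup after erase
theorem pv_get?_erase (d : PySem.Dict String Int) (k k' : String) :
    (d.erase k).get? k' = if k' = k then none else d.get? k' := by
  simp only [PySem.Dict.erase, PySem.Dict.get?]
  by_cases h2 : k' = k
  · subst h2
    rw [if_pos rfl, List.find?_eq_none.mpr]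
    · rfl
    · intro x hx
      have hne := (List.mem_filter.mp hx).2
      simp at hne ⊢
      exact hne
  · rw [if_neg h2]
    congr 1
    induction d.items with
    | nil => rfl
    | cons q t ih =>
      by_cases hq : q.1 = k
      · have e2 : (q.1 == k') = false := by
          simp [hq]; exact fun h => h2 h.symm
        rw [List.filter_cons_of_neg (by simp [hq]), ih, List.find?_cons_of_neg (by simp [e2])]
      · by_cases hq' : q.1 = k'
        · rw [List.filter_cons_of_pos (by simp [hq]), List.find?_cons_of_pos (by simp [hq']),
            List.find?_cons_of_pos (by simp [hq'])]
        · rw [List.filter_cons_of_pos (by simp [hq]), List.find?_cons_of_neg (by simp [hq']),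
            List.find?_cons_of_neg (by simp [hq']), ih]

-- A's check loop is the conjunction over the items
theorem aCheck_eq_true_iff (ef : PySem.Dict String Int) (l : List (String × Int)) :
    aCheck ef l = true ↔ ∀ p ∈ l, ef.contains p.1 = true ∧ ¬ ef.getD p.1 0 < p.2 := by
  induction l with
  | nil => simp [aCheck]
  | cons p t ih =>
    obtain ⟨m, dose⟩ := p
    by_cases hc : ef.contains m = true <;> by_cases hd : ef.getD m 0 < dose <;>
      simp_all [aCheck]

-- A is exactly: every prescribed medicine occurs in estoque at least as often as in prescricao
theorem A_char (p e : List String) :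
    verificar_prescricao p e = true ↔ ∀ m, (p.count m : Int) ≤ (e.count m : Int) := by
  simp only [verificar_prescricao, PySem.Dict.foldl_insert_getD_add_one_eq_counter]
  rw [aCheck_eq_true_iff, PySem.Dict.items_counter]
  constructor
  · intro h m
    by_cases hm : m ∈ p
    · have := h (m, (p.count m : Int)) (by
        simp only [List.mem_map]
        exact ⟨m, by simpa [PySem.Set.mem_ofList] using hm, rfl⟩)
      simp only [PySem.Dict.getD_counter, not_lt] at this
      exact this.2
    · rw [List.count_eq_zero_of_not_mem hm]
      positivity
  · intro h q hq
    simp only [List.mem_map] at hq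
    obtain ⟨m, hm, rfl⟩ := hq
    rw [PySem.Set.mem_ofList] at hm
    have hcnt : 0 < p.count m := List.count_pos_iff.mpr hm
    have hle := h m
    refine ⟨?_, by simpa [PySem.Dict.getD_counter] using hle⟩
    rw [PySem.Dict.contains_counter]
    have hpos : 0 < e.count m := by omega
    simpa [List.contains_iff_mem] using List.count_pos_iff.mp hpos

-- invariant of B's consuming loop: lookups track (initial demand) − (stock seen so far)
theorem consume_get? (es : List String) (f : String → Int) (d : PySem.Dict String Int)
    (h : ∀ m, d.get? m = if 0 < f m then some (f m) else none) :
    ∀ m, (es.foldl bStep d).get? m =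
      if 0 < f m - (es.count m : Int) then some (f m - (es.count m : Int)) else none := by
  induction es generalizing f d with
  | nil => simpa using h
  | cons x t ih =>
    intro m
    have hstep : ∀ m', (bStep d x).get? m' =
        if 0 < (if m' = x then f m' - 1 else f m') then
          some (if m' = x then f m' - 1 else f m') else none := by
      intro m'
      unfold bStep
      have hcx : d.contains x = (d.get? x).isSome := PySem.Dict.contains_eq_isSome_get? d x
      by_cases hx : 0 < f x
      · have hget : d.get? x = some (f x) := by rw [h x]; simp [hx]
        have hgd : d.getD x 0 = f x := by simp [PySem.Dict.getD_eq_get?_getD, hget]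
        rw [hcx, hget]
        simp only [Option.isSome_some, if_true, hgd]
        by_cases h1 : f x = 1
        · simp only [h1, beq_self_eq_true, if_true, pv_get?_erase]
          by_cases hmx : m' = x <;> simp [hmx, h1, h m']
        · have hb : (f x == 1) = false := by simp [h1]
          rw [hb]
          simp only [Bool.false_eq_true, if_false, PySem.Dict.get?_insert]
          by_cases hmx : m' = x
          · subst hmx; simp; omega
          · simp [hmx, h m']
      · have hget : d.get? x = none := by rw [h x]; simp [hx]
        rw [hcx, hget]
        simp only [Option.isSome_none, Bool.false_eq_true, if_false]
        by_cases hmx : m' = x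
        · subst hmx
          rw [h m']
          simp [hx]
          omega
        · simp [hmx, h m']
    have hrec := ih (fun m' => if m' = x then f m' - 1 else f m') (bStep d x) hstep m
    simp only [List.foldl_cons]
    rw [hrec]
    by_cases hmx : m = x
    · have hc : (x :: t).count m = t.count m + 1 := by
        subst hmx; simp
      rw [hc]
      simp only [if_pos hmx]
      push_cast
      have harith : f m - 1 - (t.count m : Int) = f m - ((t.count m : Int) + 1) := by ring
      rw [harith]
    · have hc : (x :: t).count m = t.count m := by
        simp [List.count_cons]
        exact fun hh => hmx hh.symm
      rw [hc]
      simp only [if_neg hmx]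

-- a dict is empty iff every lookup fails
theorem size_zero_iff_get?_none (d : PySem.Dict String Int) :
    (d.size == 0) = true ↔ ∀ m, d.get? m = none := by
  obtain ⟨items⟩ := d
  cases items with
  | nil => simp [PySem.Dict.size, PySem.Dict.get?]
  | cons p t =>
    simp only [PySem.Dict.size, List.length_cons, beq_iff_eq, Nat.succ_ne_zero,
      false_iff, not_forall]
    exact ⟨p.1, by simp [PySem.Dict.get?, List.find?]⟩

-- B is exactly the same condition
theorem B_char (p e : List String) :
    verificar_prescricao_alt p e = true ↔ ∀ m, (p.count m : Int) ≤ (e.count m : Int) := by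
  simp only [verificar_prescricao_alt, PySem.Dict.foldl_insert_getD_add_one_eq_counter]
  rw [size_zero_iff_get?_none]
  have hinit : ∀ m, (PySem.Dict.counter p).get? m =
      if 0 < (p.count m : Int) then some ((p.count m : Int)) else none := by
    intro m
    have hc : (PySem.Dict.counter p).contains m = p.contains m :=
      PySem.Dict.contains_counter p m
    by_cases hm : m ∈ p
    · have hpos : 0 < p.count m := List.count_pos_iff.mpr hm
      have hct : (PySem.Dict.counter p).contains m = true := by
        rw [hc]; simpa [List.contains_iff_mem] using hm
      have hne : (PySem.Dict.counter p).get? m ≠ none := by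
        rw [Ne, PySem.Dict.get?_eq_none_iff_contains]; simp [hct]
      obtain ⟨v, hv⟩ := Option.ne_none_iff_exists'.mp hne
      have hv' : (PySem.Dict.counter p).getD m 0 = v := by
        simp [PySem.Dict.getD_eq_get?_getD, hv]
      rw [PySem.Dict.getD_counter] at hv'
      rw [hv, ← hv']
      have hpos' : (0:Int) < (p.count m : Int) := by exact_mod_cast hpos
      rw [if_pos hpos']
    · have hnone : (PySem.Dict.counter p).get? m = none := by
        rw [PySem.Dict.get?_eq_none_iff_contains, hc]
        simpa [List.contains_iff_mem] using hm
      rw [hnone, List.count_eq_zero_of_not_mem hm]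
      simp
  constructor
  · intro h m
    have hm := h m
    rw [consume_get? e (fun m => (p.count m : Int)) _ hinit m] at hm
    by_contra hlt
    push Not at hlt
    rw [if_pos (by omega)] at hm
    exact (Option.some_ne_none _) hm
  · intro h m
    rw [consume_get? e (fun m => (p.count m : Int)) _ hinit m]
    have hm := h m
    rw [if_neg (by omega)]

-- ===== VERDICT (by name: the statement is the Claim_ definition above) =====
theorem verificar_prescricao_spec : Claim_equal_verificar_prescricao := by
  intro p e _
  unfold Spec_verificar_prescricao
  rw [Bool.eq_iff_iff, A_char, B_char]
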